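-- pv_equiv track=rewrite | github.com/ohjann/FYP | src/SPEACIDs.py | getTrad
-- ===== SOURCE A (Python) =====
-- tradChords = [  ("I", set ([ "C", "E", "G" ]) ),
--                 ("II", set ([ "D", "F", "A"]) ),
--                 ("III", set ([ "E", "G", "B"]) ),
--                 ("IV", set ([ "F", "A", "C"]) ),
--                 ("V", set ([ "G", "B", "D"]) ),
--                 ("VI", set ([ "A", "C", "E"]) ),
--                 ("VII", set ([ "B", "D", "G"]) )
--     ]
--
-- def getTrad(notes, duration):
--     """ Compares passed notes to traditional chord identifiers.
--     :param notes: list of notes in the form 'NOTE''OCTAVE' with no space between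
--     :type notes: list[str]
--     :returns: list of chord identifiers best matching passed notes
--     :rtype: list[str]
--     """
--     tradcount = [0] * len(tradChords)
--     for i in range(0, len(tradChords)):
--         for j in range(len(notes)):
--             if len(notes[j]):
--                 if notes[j][0] in tradChords[i][1]:
--                     tradcount[i] += duration[j]
--     m = max(tradcount)
--     maximums = [i for i, j in enumerate(tradcount) if j == m]
--     tradID = []
--     for maxx in maximums:
--         tradID.append(tradChords[maxx][0])
--     return tradID
-- ===== SOURCE B (Python) =====
-- tradChords = [  ("I", set ([ "C", "E", "G" ]) ),
--                 ("II", set ([ "D", "F", "A"]) ),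
--                 ("III", set ([ "E", "G", "B"]) ),
--                 ("IV", set ([ "F", "A", "C"]) ),
--                 ("V", set ([ "G", "B", "D"]) ),
--                 ("VI", set ([ "A", "C", "E"]) ),
--                 ("VII", set ([ "B", "D", "G"]) )
--     ]
--
-- def getTrad(notes, duration):
--     # inverted index: pitch letter -> chord indices containing it (built once)
--     index = {}
--     for i in range(len(tradChords)):
--         for letter in tradChords[i][1]:
--             index.setdefault(letter, []).append(i)
--     tradcount = [0] * len(tradChords)
--     # single pass over the notes
--     for note, dur in zip(notes, duration):
--         if note:
--             for i in index.get(note[0], []):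
--                 tradcount[i] += dur
--     m = max(tradcount)
--     return [tradChords[i][0] for i, c in enumerate(tradcount) if c == m]
-- ===== Notes on version B (the rewrite author's own statement) =====
-- stated objective: alternative
-- what changed: Replaces the 7x(n) chord-by-chord rescans of the note list by an inverted index (pitch letter -> chord indices) built once from the chord table, followed by a single pass over zip(notes, duration) that credits each note's duration to exactly the chords containing its letter.
import Mathlib
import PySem

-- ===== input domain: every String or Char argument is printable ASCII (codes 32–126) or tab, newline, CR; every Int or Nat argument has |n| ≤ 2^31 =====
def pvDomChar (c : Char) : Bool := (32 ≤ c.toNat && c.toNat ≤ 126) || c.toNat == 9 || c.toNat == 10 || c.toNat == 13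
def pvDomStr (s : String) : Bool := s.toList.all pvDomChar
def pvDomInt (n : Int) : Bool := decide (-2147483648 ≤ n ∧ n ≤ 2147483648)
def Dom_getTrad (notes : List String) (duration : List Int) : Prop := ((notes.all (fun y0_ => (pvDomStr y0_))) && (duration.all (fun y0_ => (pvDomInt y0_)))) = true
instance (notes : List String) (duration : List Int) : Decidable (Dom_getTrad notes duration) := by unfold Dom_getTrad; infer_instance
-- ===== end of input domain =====

-- B replaces A's 7 rescans of the note list by an inverted letter→chords index and one pass over zip(notes, duration); return-value equivalence on Pre_ (no mutation in either program).

-- ===== PORT A =====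
-- Python's one-character string notes[j][0] is modelled as a Char; the chord sets are sets of those characters.
def tradChords : List (String × PySem.Set Char) :=
  [("I", PySem.Set.ofList ['C','E','G']),
   ("II", PySem.Set.ofList ['D','F','A']),
   ("III", PySem.Set.ofList ['E','G','B']),
   ("IV", PySem.Set.ofList ['F','A','C']),
   ("V", PySem.Set.ofList ['G','B','D']),
   ("VI", PySem.Set.ofList ['A','C','E']),
   ("VII", PySem.Set.ofList ['B','D','G'])]

-- s[0] under the caller's nonempty guard (the guard makes the default unreachable)
def pvFirst (s : String) : Char := (PySem.Str.pyGet? s 0).getD ' '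

def getTrad (notes : List String) (duration : List Int) : List String :=
  let tradcount : List Int := List.replicate tradChords.length 0
  let tradcount :=
    (PySem.List.pyRange 0 (PySem.List.len tradChords) 1).foldl (fun tc i =>
      (PySem.List.pyRange 0 (PySem.List.len notes) 1).foldl (fun tc j =>
        if PySem.Str.len (PySem.List.pyGetD notes j "") ≠ 0 then
          if PySem.Set.contains (PySem.List.pyGetD tradChords i ("", PySem.Set.empty)).2
               (pvFirst (PySem.List.pyGetD notes j "")) then
            PySem.List.pySetD tc i (PySem.List.pyGetD tc i 0 + PySem.List.pyGetD duration j 0)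
          else tc
        else tc) tc) tradcount
  let m : Int := PySem.List.maxD tradcount (fun x => x) 0
  let maximums : List Int :=
    ((PySem.List.enumerate tradcount).filter (fun p => p.2 == m)).map (fun p => p.1)
  maximums.foldl (fun acc maxx => acc ++ [(PySem.List.pyGetD tradChords maxx ("", PySem.Set.empty)).1]) []

-- ===== PORT B =====
def getTrad_alt (notes : List String) (duration : List Int) : List String :=
  let index : PySem.Dict Char (List Int) :=
    (PySem.List.pyRange 0 (PySem.List.len tradChords) 1).foldl (fun d i =>
      ((PySem.List.pyGetD tradChords i ("", PySem.Set.empty)).2).foldl (fun d letter =>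
        PySem.Dict.modify d letter [] (· ++ [i])) d) PySem.Dict.empty
  let tradcount : List Int := List.replicate tradChords.length 0
  let tradcount :=
    (notes.zip duration).foldl (fun tc nd =>
      if nd.1 ≠ "" then
        (index.getD (pvFirst nd.1) []).foldl (fun tc i =>
          PySem.List.pySetD tc i (PySem.List.pyGetD tc i 0 + nd.2)) tc
      else tc) tradcount
  let m : Int := PySem.List.maxD tradcount (fun x => x) 0
  ((PySem.List.enumerate tradcount).filter (fun p => p.2 == m)).map
    (fun p => (PySem.List.pyGetD tradChords p.1 ("", PySem.Set.empty)).1)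

-- ===== PRECONDITION & SPEC =====
-- Pre_ excludes exactly the inputs on which A raises IndexError: a note whose first
-- character is a chord letter (A–G) at an index with no duration (duration[j] is read there).
def Pre_getTrad (notes : List String) (duration : List Int) : Prop :=
  ∀ j < notes.length, duration.length ≤ j →
    ((notes.getD j "").toList.headD ' ') ∉ (['A','B','C','D','E','F','G'] : List Char)
instance (notes : List String) (duration : List Int) : Decidable (Pre_getTrad notes duration) := by
  unfold Pre_getTrad; infer_instance
def pvWitness_getTrad : List String × List Int := (["C4", "E4", "x"], [2, 1, 3])

def Spec_getTrad (notes : List String) (duration : List Int) (out : List String) : Prop :=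
  out = getTrad_alt notes duration
instance (notes : List String) (duration : List Int) (out : List String) : Decidable (Spec_getTrad notes duration out) := by
  unfold Spec_getTrad; infer_instance

-- ===== CLAIM (what is proved, stated in full; the proofs are below) =====
def Claim_equal_getTrad : Prop := ∀ (notes : List String) (duration : List Int), Dom_getTrad notes duration → Pre_getTrad notes duration → Spec_getTrad notes duration (getTrad notes duration)

-- ===== LEMMAS AND PROOFS =====

-- the inverted index B builds, as a literal
def pvIdx : PySem.Dict Char (List Int) :=
  PySem.Dict.mk [('C', [0, 3, 5]), ('E', [0, 2, 5]), ('G', [0, 2, 4, 6]),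
                 ('D', [1, 4, 6]), ('F', [1, 3]), ('A', [1, 3, 5]), ('B', [2, 4, 6])]

-- the common tail of both programs (max + tie collection), B's shape
def pvTail (tc : List Int) : List String :=
  ((PySem.List.enumerate tc).filter (fun p => p.2 == PySem.List.maxD tc (fun x => x) 0)).map
    (fun p => (PySem.List.pyGetD tradChords p.1 ("", PySem.Set.empty)).1)

-- A's count table
def pvInner (notes : List String) (duration : List Int) (i : Int) (tc : List Int) : List Int :=
  (PySem.List.pyRange 0 (PySem.List.len notes) 1).foldl (fun tc j =>
    if PySem.Str.len (PySem.List.pyGetD notes j "") ≠ 0 then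
      if PySem.Set.contains (PySem.List.pyGetD tradChords i ("", PySem.Set.empty)).2
           (pvFirst (PySem.List.pyGetD notes j "")) then
        PySem.List.pySetD tc i (PySem.List.pyGetD tc i 0 + PySem.List.pyGetD duration j 0)
      else tc
    else tc) tc

def pvCntA (notes : List String) (duration : List Int) : List Int :=
  (PySem.List.pyRange 0 (PySem.List.len tradChords) 1).foldl
    (fun tc i => pvInner notes duration i tc) (List.replicate tradChords.length 0)

-- A's scalar count for one chord, from a start value
def pvCntFrom (notes : List String) (duration : List Int) (i : Int) (a : Int) : Int :=
  (PySem.List.pyRange 0 (PySem.List.len notes) 1).foldl (fun a j =>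
    if PySem.Str.len (PySem.List.pyGetD notes j "") ≠ 0 then
      if PySem.Set.contains (PySem.List.pyGetD tradChords i ("", PySem.Set.empty)).2
           (pvFirst (PySem.List.pyGetD notes j "")) then
        a + PySem.List.pyGetD duration j 0
      else a
    else a) a

-- B's count table (with the index literal)
def pvBodyB (tc : List Int) (nd : String × Int) : List Int :=
  if nd.1 ≠ "" then
    (pvIdx.getD (pvFirst nd.1) []).foldl (fun tc i =>
      PySem.List.pySetD tc i (PySem.List.pyGetD tc i 0 + nd.2)) tc
  else tc

def pvCntB (notes : List String) (duration : List Int) : List Int :=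
  (notes.zip duration).foldl pvBodyB (List.replicate tradChords.length 0)

-- B's scalar count for chord i
def pvZ (notes : List String) (duration : List Int) (i : Nat) : Int :=
  (notes.zip duration).foldl (fun a nd =>
    if nd.1 ≠ "" then a + nd.2 * (((pvIdx.getD (pvFirst nd.1) []).count (i : Int) : Int)) else a) 0

lemma pvFirst_headD (s : String) : pvFirst s = s.toList.headD ' ' := by
  simp only [pvFirst, PySem.Str.pyGet?]
  generalize s.toList = cs
  cases cs <;> simp [PySem.List.pyGet?_zero]

lemma pvLenNe (s : String) : PySem.Str.len s ≠ 0 ↔ s ≠ "" := by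
  rw [PySem.Str.len_eq]
  simp [Int.natCast_eq_zero]

lemma pvZipApp (xs : List String) (x : String) (ds : List Int) :
    (xs ++ [x]).zip ds = xs.zip ds ++ [x].zip (ds.drop xs.length) := by
  induction xs generalizing ds with
  | nil => simp
  | cons a xs ih =>
    cases ds with
    | nil => simp
    | cons d ds => simp [ih]

lemma getTrad_eq_tail (notes : List String) (duration : List Int) :
    getTrad notes duration = pvTail (pvCntA notes duration) := by
  unfold getTrad pvTail pvCntA pvInner
  simp only [PySem.List.foldl_append_singleton_eq_map, List.nil_append, List.map_map]
  rfl

lemma getTrad_alt_eq_tail (notes : List String) (duration : List Int) :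
    getTrad_alt notes duration = pvTail (pvCntB notes duration) := by
  unfold getTrad_alt pvTail pvCntB pvBodyB
  rfl

lemma pvInner_len (notes : List String) (duration : List Int) (i : Int) (tc : List Int) :
    (pvInner notes duration i tc).length = tc.length := by
  unfold pvInner
  generalize (PySem.List.pyRange 0 (PySem.List.len notes) 1) = js
  induction js generalizing tc with
  | nil => rfl
  | cons j js ih =>
    simp only [List.foldl_cons]
    rw [ih]
    split_ifs <;> simp [PySem.List.length_pySetD]

lemma pvInner_eq (notes : List String) (duration : List Int) (i : Int) (tc : List Int)
    (h0 : 0 ≤ i) (h : i.toNat < tc.length) :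
    pvInner notes duration i tc = tc.set i.toNat (pvCntFrom notes duration i (tc.getD i.toNat 0)) := by
  unfold pvInner pvCntFrom
  generalize (PySem.List.pyRange 0 (PySem.List.len notes) 1) = js
  revert h
  induction js generalizing tc with
  | nil =>
    intro h
    simp only [List.foldl_nil]
    rw [List.getD_eq_getElem _ _ h, List.set_getElem_self]
  | cons j js ih =>
    intro h
    simp only [List.foldl_cons]
    split_ifs with h1 h2
    · rw [ih _ (by rw [PySem.List.length_pySetD]; exact h)]
      rw [PySem.List.pySetD_of_nonneg _ _ h0, List.set_set]
      have hg : PySem.List.pyGetD tc i 0 = tc.getD i.toNat 0 := by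
        have hi2 : i = ((i.toNat : Nat) : Int) := by omega
        conv_lhs => rw [hi2]
        rw [PySem.List.pyGetD_natCast]
      have hlt : i.toNat < (tc.set i.toNat (PySem.List.pyGetD tc i 0 + PySem.List.pyGetD duration j 0)).length := by
        simpa using h
      rw [List.getD_eq_getElem _ _ hlt, List.getElem_set_self, hg]
    · exact ih tc h
    · exact ih tc h

lemma pvCntA_eq (notes : List String) (duration : List Int) :
    pvCntA notes duration =
      [pvCntFrom notes duration 0 0, pvCntFrom notes duration 1 0, pvCntFrom notes duration 2 0,
       pvCntFrom notes duration 3 0, pvCntFrom notes duration 4 0, pvCntFrom notes duration 5 0,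
       pvCntFrom notes duration 6 0] := by
  have h7 : PySem.List.pyRange 0 (PySem.List.len tradChords) 1 = [0, 1, 2, 3, 4, 5, 6] := by decide
  unfold pvCntA
  rw [h7]
  simp only [List.foldl_cons, List.foldl_nil]
  rw [pvInner_eq _ _ 6 _ (by norm_num) (by simp [pvInner_len, tradChords]),
      pvInner_eq _ _ 5 _ (by norm_num) (by simp [pvInner_len, tradChords]),
      pvInner_eq _ _ 4 _ (by norm_num) (by simp [pvInner_len, tradChords]),
      pvInner_eq _ _ 3 _ (by norm_num) (by simp [pvInner_len, tradChords]),
      pvInner_eq _ _ 2 _ (by norm_num) (by simp [pvInner_len, tradChords]),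
      pvInner_eq _ _ 1 _ (by norm_num) (by simp [pvInner_len, tradChords]),
      pvInner_eq _ _ 0 _ (by norm_num) (by simp [tradChords])]
  rfl

lemma pvIdx_getD_other (c : Char) (hA : c ≠ 'A') (hB : c ≠ 'B') (hC : c ≠ 'C') (hD : c ≠ 'D')
    (hE : c ≠ 'E') (hF : c ≠ 'F') (hG : c ≠ 'G') : pvIdx.getD c [] = [] := by
  unfold pvIdx
  rw [PySem.Dict.getD_eq_get?_getD]
  simp [PySem.Dict.get?_mk_cons, Ne.symm hA, Ne.symm hB, Ne.symm hC, Ne.symm hD,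
        Ne.symm hE, Ne.symm hF, Ne.symm hG]
  rfl

lemma pvIdx_bounds (c : Char) (k : Int) (hk : k ∈ pvIdx.getD c []) : 0 ≤ k ∧ k < 7 := by
  rcases eq_or_ne c 'C' with rfl | hC
  · simp [show pvIdx.getD 'C' [] = [0, 3, 5] from by decide] at hk; omega
  rcases eq_or_ne c 'E' with rfl | hE
  · simp [show pvIdx.getD 'E' [] = [0, 2, 5] from by decide] at hk; omega
  rcases eq_or_ne c 'G' with rfl | hG
  · simp [show pvIdx.getD 'G' [] = [0, 2, 4, 6] from by decide] at hk; omega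
  rcases eq_or_ne c 'D' with rfl | hD
  · simp [show pvIdx.getD 'D' [] = [1, 4, 6] from by decide] at hk; omega
  rcases eq_or_ne c 'F' with rfl | hF
  · simp [show pvIdx.getD 'F' [] = [1, 3] from by decide] at hk; omega
  rcases eq_or_ne c 'A' with rfl | hA
  · simp [show pvIdx.getD 'A' [] = [1, 3, 5] from by decide] at hk; omega
  rcases eq_or_ne c 'B' with rfl | hB
  · simp [show pvIdx.getD 'B' [] = [2, 4, 6] from by decide] at hk; omega
  · rw [pvIdx_getD_other c hA hB hC hD hE hF hG] at hk
    cases hk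

lemma pvMulti_len (v : Int) (L : List Int) (tc : List Int) :
    (L.foldl (fun tc k => PySem.List.pySetD tc k (PySem.List.pyGetD tc k 0 + v)) tc).length = tc.length := by
  induction L generalizing tc with
  | nil => rfl
  | cons k L ih =>
    simp only [List.foldl_cons]
    rw [ih]
    simp [PySem.List.length_pySetD]

lemma pvMulti_getD (v : Int) (L : List Int) (tc : List Int) (i : Nat) (hi : i < tc.length)
    (hL : ∀ k ∈ L, 0 ≤ k ∧ k < (tc.length : Int)) :
    (L.foldl (fun tc k => PySem.List.pySetD tc k (PySem.List.pyGetD tc k 0 + v)) tc).getD i 0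
      = tc.getD i 0 + v * (L.count (i : Int) : Int) := by
  induction L generalizing tc with
  | nil => simp
  | cons k L ih =>
    obtain ⟨hk0, hklt⟩ := hL k (List.mem_cons_self)
    have hkn : k.toNat < tc.length := by omega
    simp only [List.foldl_cons]
    rw [PySem.List.pySetD_of_nonneg _ _ hk0]
    rw [ih _ (by simpa using hi) (by intro x hx; simpa using hL x (List.mem_cons_of_mem _ hx))]
    have hg : PySem.List.pyGetD tc k 0 = tc.getD k.toNat 0 := by
      have hk2 : k = ((k.toNat : Nat) : Int) := by omega
      conv_lhs => rw [hk2]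
      rw [PySem.List.pyGetD_natCast]
    rw [hg]
    by_cases hik : k = (i : Int)
    · have hkt : k.toNat = i := by omega
      rw [hkt]
      rw [List.getD_eq_getElem _ _ (by simpa using hi), List.getElem_set_self]
      have hcnt : (k :: L).count (i : Int) = L.count (i : Int) + 1 := by
        rw [List.count_cons]
        simp [hik]
      rw [hcnt]
      push_cast
      ring
    · have hne : k.toNat ≠ i := by omega
      rw [List.getD_eq_getElem?_getD, List.getElem?_set, if_neg hne, ← List.getD_eq_getElem?_getD]
      have hcnt : (k :: L).count (i : Int) = L.count (i : Int) := by
        rw [List.count_cons]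
        simp [hik]
      rw [hcnt]

lemma pvBodyB_len (tc : List Int) (nd : String × Int) : (pvBodyB tc nd).length = tc.length := by
  unfold pvBodyB
  split_ifs <;> simp [pvMulti_len]

lemma pvB_len (l : List (String × Int)) (tc : List Int) :
    (l.foldl pvBodyB tc).length = tc.length := by
  induction l generalizing tc with
  | nil => rfl
  | cons nd l ih =>
    simp only [List.foldl_cons]
    rw [ih, pvBodyB_len]

lemma pvB_getD (l : List (String × Int)) (tc : List Int) (i : Nat) (hi : i < tc.length)
    (h7 : tc.length = 7) :
    (l.foldl pvBodyB tc).getD i 0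
      = l.foldl (fun a nd =>
          if nd.1 ≠ "" then a + nd.2 * (((pvIdx.getD (pvFirst nd.1) []).count (i : Int) : Int)) else a)
        (tc.getD i 0) := by
  induction l generalizing tc with
  | nil => rfl
  | cons nd l ih =>
    simp only [List.foldl_cons]
    rw [ih _ (by rw [pvBodyB_len]; exact hi) (by rw [pvBodyB_len]; exact h7)]
    congr 1
    unfold pvBodyB
    split_ifs with h1
    · rw [pvMulti_getD nd.2 _ tc i hi
        (by intro k hk; have hb := pvIdx_bounds _ k hk; omega)]
    · rfl

lemma pvCntB_eq (notes : List String) (duration : List Int) :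
    pvCntB notes duration =
      [pvZ notes duration 0, pvZ notes duration 1, pvZ notes duration 2, pvZ notes duration 3,
       pvZ notes duration 4, pvZ notes duration 5, pvZ notes duration 6] := by
  have hlen : (pvCntB notes duration).length = 7 := by
    unfold pvCntB
    rw [pvB_len]
    rfl
  apply List.ext_getElem (by simp [hlen])
  intro i hi1 hi2
  have hi7 : i < 7 := by simpa using hi2
  rw [← List.getD_eq_getElem _ 0 hi1]
  unfold pvCntB
  rw [pvB_getD _ _ i (by simp [tradChords]; omega) (by simp [tradChords])]
  rw [show (List.replicate tradChords.length (0 : Int)).getD i 0 = 0 from by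
        rw [List.getD_eq_getElem?_getD, List.getElem?_replicate]
        simp [tradChords, hi7]]
  unfold pvZ
  interval_cases i <;> rfl

lemma pvChord_sub (i : Nat) (hi : i < 7) (c : Char)
    (hc : PySem.Set.contains (PySem.List.pyGetD tradChords (i : Int) ("", PySem.Set.empty)).2 c = true) :
    c ∈ (['A','B','C','D','E','F','G'] : List Char) := by
  have hmem := (PySem.Set.contains_iff _ _).mp hc
  have hilen : i < tradChords.length := by simp [tradChords]; omega
  have h1 : PySem.List.pyGetD tradChords (i : Int) ("", PySem.Set.empty) ∈ tradChords := by
    rw [PySem.List.pyGetD_natCast, List.getD_eq_getElem _ _ hilen]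
    exact List.getElem_mem hilen
  have hS : (PySem.List.pyGetD tradChords (i : Int) ("", PySem.Set.empty)).2
      ∈ tradChords.map (fun p => p.2) := List.mem_map.mpr ⟨_, h1, rfl⟩
  have hall : ∀ S ∈ tradChords.map (fun p => p.2), ∀ x ∈ S,
      x ∈ (['A','B','C','D','E','F','G'] : List Char) := by
    intro S hS x hx
    simp only [tradChords, List.map_cons, List.map_nil, List.mem_cons, List.not_mem_nil,
               or_false] at hS
    rcases hS with rfl | rfl | rfl | rfl | rfl | rfl | rfl <;>
    · rw [PySem.Set.mem_ofList] at hx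
      fin_cases hx <;> decide
  exact hall _ hS c hmem

lemma pvKey_count (i : Nat) (hi : i < 7) (c : Char) :
    ((pvIdx.getD c []).count (i : Int) : Int)
      = if PySem.Set.contains (PySem.List.pyGetD tradChords (i : Int) ("", PySem.Set.empty)).2 c then 1 else 0 := by
  rcases eq_or_ne c 'A' with rfl | hA
  · interval_cases i <;> decide
  rcases eq_or_ne c 'B' with rfl | hB
  · interval_cases i <;> decide
  rcases eq_or_ne c 'C' with rfl | hC
  · interval_cases i <;> decide
  rcases eq_or_ne c 'D' with rfl | hD
  · interval_cases i <;> decide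
  rcases eq_or_ne c 'E' with rfl | hE
  · interval_cases i <;> decide
  rcases eq_or_ne c 'F' with rfl | hF
  · interval_cases i <;> decide
  rcases eq_or_ne c 'G' with rfl | hG
  · interval_cases i <;> decide
  · rw [pvIdx_getD_other c hA hB hC hD hE hF hG, if_neg]
    · rfl
    · intro hc
      have hsub := pvChord_sub i hi c hc
      simp [hA, hB, hC, hD, hE, hF, hG] at hsub

lemma pvCnt_eq_pvZ (notes : List String) (duration : List Int)
    (hP : Pre_getTrad notes duration) (i : Nat) (hi : i < 7) :
    pvCntFrom notes duration (i : Int) 0 = pvZ notes duration i := by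
  have main : ∀ m, m ≤ notes.length →
      (PySem.List.pyRange 0 (m : Int) 1).foldl (fun a j =>
        if PySem.Str.len (PySem.List.pyGetD notes j "") ≠ 0 then
          if PySem.Set.contains (PySem.List.pyGetD tradChords (i : Int) ("", PySem.Set.empty)).2
               (pvFirst (PySem.List.pyGetD notes j "")) then
            a + PySem.List.pyGetD duration j 0
          else a
        else a) 0
      = ((notes.take m).zip duration).foldl (fun a nd =>
          if nd.1 ≠ "" then a + nd.2 * (((pvIdx.getD (pvFirst nd.1) []).count (i : Int) : Int)) else a) 0 := by
    intro m
    induction m with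
    | zero => intro _; simp [PySem.List.pyRange_one_eq_nil]
    | succ m ih =>
      intro hm1
      have hm' : m < notes.length := by omega
      have hcast : ((m + 1 : Nat) : Int) = (m : Int) + 1 := by push_cast; ring
      rw [hcast, PySem.List.pyRange_one_succ_right (Int.natCast_nonneg m), List.foldl_append,
          ih (by omega)]
      rw [List.take_add_one, List.getElem?_eq_getElem hm']
      simp only [Option.toList_some]
      rw [pvZipApp, List.length_take_of_le hm'.le]
      have hnotes : PySem.List.pyGetD notes (m : Int) "" = notes[m] := by
        rw [PySem.List.pyGetD_natCast, List.getD_eq_getElem _ _ hm']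
      by_cases hd : m < duration.length
      · rw [List.drop_eq_getElem_cons hd]
        simp only [List.zip_cons_cons, List.zip_nil_left]
        rw [List.foldl_append]
        simp only [List.foldl_cons, List.foldl_nil]
        have hdur : PySem.List.pyGetD duration (m : Int) 0 = duration[m] := by
          rw [PySem.List.pyGetD_natCast, List.getD_eq_getElem _ _ hd]
        rw [hnotes, hdur, pvKey_count i hi (pvFirst notes[m])]
        by_cases hne : notes[m] = ""
        · rw [hne]
          norm_num [PySem.Str.len_eq, show ("" : String).toList = [] from rfl]
        · have hlen2 : PySem.Str.len notes[m] ≠ 0 := (pvLenNe _).mpr hne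
          rw [if_pos hlen2, if_pos hne]
          split_ifs <;> ring
      · have hdrop : duration.drop m = [] := List.drop_eq_nil_of_le (by omega)
        rw [hdrop]
        simp only [List.zip_nil_right, List.append_nil]
        simp only [List.foldl_cons, List.foldl_nil]
        rw [hnotes]
        by_cases hne : notes[m] = ""
        · rw [hne]
          norm_num [PySem.Str.len_eq, show ("" : String).toList = [] from rfl]
        · have hPm := hP m hm' (by omega)
          rw [List.getD_eq_getElem _ _ hm'] at hPm
          have hcont : ¬ (PySem.Set.contains (PySem.List.pyGetD tradChords (i : Int) ("", PySem.Set.empty)).2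
              (pvFirst notes[m]) = true) := by
            intro hc
            apply hPm
            have hsub := pvChord_sub i hi _ hc
            rwa [pvFirst_headD] at hsub
          rw [if_neg hcont]
          simp
  have hfin := main notes.length le_rfl
  rw [List.take_length] at hfin
  unfold pvCntFrom pvZ
  simpa [PySem.List.len_eq] using hfin

-- ===== VERDICT (by name: the statement is the Claim_ definition above) =====
theorem getTrad_spec : Claim_equal_getTrad := by
  intro notes duration _ hP
  unfold Spec_getTrad
  rw [getTrad_eq_tail, getTrad_alt_eq_tail, pvCntA_eq, pvCntB_eq]
  have h := fun (i : Nat) (hi : i < 7) => pvCnt_eq_pvZ notes duration hP i hi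
  have h0 := h 0 (by norm_num); have h1 := h 1 (by norm_num); have h2 := h 2 (by norm_num)
  have h3 := h 3 (by norm_num); have h4 := h 4 (by norm_num); have h5 := h 5 (by norm_num)
  have h6 := h 6 (by norm_num)
  norm_num at h0 h1 h2 h3 h4 h5 h6
  rw [h0, h1, h2, h3, h4, h5, h6]
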